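-- pv_equiv track=rewrite | github.com/asozialesnetzwerk/an-website | an_website/swapped_words/config_file.py | copy_case
-- ===== SOURCE A (Python) =====
-- def copy_case_letter(char_to_steal_case_from: str, char_to_change: str) -> str:
--     """
--     Copy the case of one string to another.
--
--     This method assumes that the whole string has the same case, like it is
--     the case for a letter.
--     """
--     return (
--         char_to_change.upper()  # char_to_steal_case_from is upper case
--         if char_to_steal_case_from.isupper()
--         else char_to_change.lower()  # char_to_steal_case_from is lower case
--     )
--
-- def copy_case(reference_word: str, word_to_change: str) -> str:
--     """Copy the case of one string to another."""
--     # lower case: "every letter is lower case"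
--     if reference_word.islower():
--         return word_to_change.lower()
--     # upper case: "EVERY LETTER IS UPPER CASE"
--     if reference_word.isupper():
--         return word_to_change.upper()
--     # title case: "Every Word Begins With Upper Case Letter"
--     if reference_word.istitle():
--         return word_to_change.title()
--
--     split_ref = reference_word.split(" ")
--     split_word = word_to_change.split(" ")
--     # if both equal length and not len == 1
--     if len(split_ref) == len(split_word) != 1:
--         # go over every word, if there are spaces
--         return " ".join(
--             copy_case(split_ref[i], split_word[i])
--             for i in range(len(split_ref))
--         )
--
--     # other words
--     new_word: list[str] = []  # use list for speed
--     for i, letter in enumerate(word_to_change):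
--         new_word.append(
--             copy_case_letter(
--                 # overflow original word for mixed case
--                 reference_word[i % len(reference_word)],
--                 letter,
--             )
--         )
--     # create new word and return it
--     return "".join(new_word)
-- ===== SOURCE B (Python) =====
-- def _case_mask(ref, word):
--     """Whole-string case rules, expressed as a per-character upper/lower mask (or None)."""
--     if ref.islower():
--         return [False] * len(word)
--     if ref.isupper():
--         return [True] * len(word)
--     if ref.istitle():
--         mask = []
--         prev_alpha = False
--         for c in word:
--             mask.append(not prev_alpha)
--             prev_alpha = c.isalpha()
--         return mask
--     return None
--
-- def _pattern_mask(ref, word):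
--     """Mixed-case rule: cycle the reference's per-character case."""
--     return [ref[i % len(ref)].isupper() for i in range(len(word))]
--
-- def _word_mask(ref, word):
--     m = _case_mask(ref, word)
--     return m if m is not None else _pattern_mask(ref, word)
--
-- def copy_case(reference_word: str, word_to_change: str) -> str:
--     """Copy the case of one string to another."""
--     mask = _case_mask(reference_word, word_to_change)
--     if mask is None:
--         split_ref = reference_word.split(" ")
--         split_word = word_to_change.split(" ")
--         if len(split_ref) == len(split_word) != 1:
--             parts = [_word_mask(r, w) for r, w in zip(split_ref, split_word)]
--             mask = parts[0]
--             for m in parts[1:]: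
--                 mask = mask + [False] + m
--         else:
--             mask = _pattern_mask(reference_word, word_to_change)
--     return "".join(c.upper() if m else c.lower() for c, m in zip(word_to_change, mask))
-- ===== Notes on version B (the rewrite author's own statement) =====
-- stated objective: alternative
-- what changed: B separates decision from application: it first computes a per-character boolean upper/lower mask (whole-string rules, concatenated per-word masks for the equal-length split case, or the cyclic pattern mask), then produces the result in one final pass applying the mask, instead of A's recursive branch-by-branch string building.
import Mathlib
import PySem

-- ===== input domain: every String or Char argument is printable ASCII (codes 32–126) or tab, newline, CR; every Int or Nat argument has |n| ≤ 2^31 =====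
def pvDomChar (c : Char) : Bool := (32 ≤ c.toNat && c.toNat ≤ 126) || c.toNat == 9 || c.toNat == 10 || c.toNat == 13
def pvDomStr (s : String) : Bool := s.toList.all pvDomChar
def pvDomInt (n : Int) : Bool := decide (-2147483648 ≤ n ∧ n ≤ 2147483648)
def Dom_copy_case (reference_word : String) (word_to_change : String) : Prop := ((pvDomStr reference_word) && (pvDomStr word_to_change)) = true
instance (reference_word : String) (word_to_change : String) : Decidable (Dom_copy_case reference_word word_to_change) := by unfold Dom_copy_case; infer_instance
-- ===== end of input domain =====

-- B separates decision from application: it first computes a per-character boolean upper/lower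
-- mask and then builds the result in one final pass, instead of A's recursive per-branch string
-- building (objective: alternative architecture, same cost).

-- ===== PORT A =====
-- str.islower() / str.isupper() / str.istitle() / str.title(), hand-ported (exact on the ASCII domain,
-- where the cased characters are exactly A-Z and a-z); shared by both ports, as both Pythons call them.
def strIslower (s : List Char) : Bool := s.any PySem.Chars.islower && !s.any PySem.Chars.isupper
def strIsupper (s : List Char) : Bool := s.any PySem.Chars.isupper && !s.any PySem.Chars.islower
def strIstitle (s : List Char) : Bool :=
  let r := s.foldl (fun (st : Bool × Bool × Bool) c =>
    if PySem.Chars.isupper c then (st.1 && !st.2.1, true, true)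
    else if PySem.Chars.islower c then (st.1 && st.2.1, true, true)
    else (st.1, false, st.2.2)) (true, false, false)
  r.1 && r.2.2
def strTitle (s : List Char) : List Char :=
  (s.foldl (fun (st : List Char × Bool) c =>
    if PySem.Chars.isalpha c then
      (st.1 ++ [if st.2 then PySem.Chars.lowerChar c else PySem.Chars.upperChar c], true)
    else (st.1 ++ [c], false)) (([] : List Char), false)).1

-- copy_case_letter (its arguments are always single characters)
def copy_case_letter (rc : Char) (c : Char) : Char :=
  if PySem.Chars.isupper rc then PySem.Chars.upperChar c else PySem.Chars.lowerChar c

-- A's final 'for i, letter in enumerate(word_to_change)' loop; on the excluded inputs where Python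
-- raises ZeroDivisionError (empty reference) pyGet? is none and the letter is kept as a junk value.
def charLoopA (ref : List Char) (w : List Char) : List Char :=
  (PySem.List.enumerate w).foldl (fun acc p =>
    acc ++ [match PySem.List.pyGet? ref (PySem.Int.mod p.1 (ref.length : Int)) with
            | some rc => copy_case_letter rc p.2
            | none => p.2]) []

-- A's recursion (fuel only makes it total; the recursion depth is at most 2, and under Pre_ the
-- fuel passed by copy_case is never exhausted — the 0 branch is unreachable there)
def copy_case_core : Nat → List Char → List Char → List Char
  | 0, _, w => w
  | fuel+1, ref, w =>
    if strIslower ref then PySem.Chars.lower w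
    else if strIsupper ref then PySem.Chars.upper w
    else if strIstitle ref then strTitle w
    else
      let sr := PySem.Chars.splitOn ref [' ']
      let sw := PySem.Chars.splitOn w [' ']
      if sr.length = sw.length ∧ sw.length ≠ 1 then
        PySem.Chars.join [' ']
          ((List.range sr.length).map (fun i => copy_case_core fuel (sr.getD i []) (sw.getD i [])))
      else charLoopA ref w

def copy_case (reference_word : String) (word_to_change : String) : String :=
  String.ofList (copy_case_core (reference_word.toList.length + 1)
    reference_word.toList word_to_change.toList)

-- ===== PORT B =====
-- _case_mask: whole-string rules as a per-character upper/lower mask (none = no rule applies)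
def caseMask (ref w : List Char) : Option (List Bool) :=
  if strIslower ref then some (List.replicate w.length false)
  else if strIsupper ref then some (List.replicate w.length true)
  else if strIstitle ref then
    some (w.foldl (fun (st : List Bool × Bool) c =>
      (st.1 ++ [!st.2], PySem.Chars.isalpha c)) (([] : List Bool), false)).1
  else none

-- _pattern_mask: cycle the reference's per-character case (pyGet? none = Python raises; excluded by Pre_)
def patternMask (ref w : List Char) : List Bool :=
  (List.range w.length).map (fun (i : Nat) =>
    match PySem.List.pyGet? ref (PySem.Int.mod (i : Int) (ref.length : Int)) with
    | some rc => PySem.Chars.isupper rc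
    | none => false)

def wordMask (ref w : List Char) : List Bool :=
  match caseMask ref w with
  | some m => m
  | none => patternMask ref w

-- the final '"".join(c.upper() if m else c.lower() for c, m in zip(word, mask))' pass
def applyMask (w : List Char) (m : List Bool) : List Char :=
  (w.zip m).map (fun p => if p.2 then PySem.Chars.upperChar p.1 else PySem.Chars.lowerChar p.1)

def copy_case_alt (reference_word : String) (word_to_change : String) : String :=
  let ref := reference_word.toList
  let w := word_to_change.toList
  let mask := match caseMask ref w with
    | some m => m
    | none =>
      let sr := PySem.Chars.splitOn ref [' ']
      let sw := PySem.Chars.splitOn w [' ']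
      if sr.length = sw.length ∧ sw.length ≠ 1 then
        let parts := (sr.zip sw).map (fun p => wordMask p.1 p.2)
        parts.tail.foldl (fun acc m => acc ++ [false] ++ m) (parts.headD [])
      else patternMask ref w
  String.ofList (applyMask w mask)

-- ===== PRECONDITION & SPEC =====
-- Pre_ excludes exactly the inputs on which Python A raises ZeroDivisionError ('i % len(reference_word)'
-- with an empty reference pattern against a non-empty word, either at top level or for a piece of the
-- equal-length space-split); Python B raises there too (IndexError via ZeroDivisionError in i % 0).
-- A returns on every admitted input.
def Pre_copy_case (reference_word : String) (word_to_change : String) : Prop :=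
  strIslower reference_word.toList = true ∨ strIsupper reference_word.toList = true ∨
  strIstitle reference_word.toList = true ∨
  (let sr := PySem.Chars.splitOn reference_word.toList [' ']
   let sw := PySem.Chars.splitOn word_to_change.toList [' ']
   if sr.length = sw.length ∧ sw.length ≠ 1
   then ∀ p ∈ sr.zip sw, p.1 = [] → p.2 = []
   else (reference_word.toList = [] → word_to_change.toList = []))
instance (reference_word : String) (word_to_change : String) : Decidable (Pre_copy_case reference_word word_to_change) := by unfold Pre_copy_case; infer_instance

def pvWitness_copy_case : String × String := ("aB cD", "word case")

def Spec_copy_case (reference_word : String) (word_to_change : String) (out : String) : Prop := out = copy_case_alt reference_word word_to_change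
instance (reference_word : String) (word_to_change : String) (out : String) : Decidable (Spec_copy_case reference_word word_to_change out) := by unfold Spec_copy_case; infer_instance

-- ===== CLAIM (what is proved, stated in full; the proofs are below) =====
def Claim_equal_copy_case : Prop := ∀ (reference_word : String) (word_to_change : String), Dom_copy_case reference_word word_to_change → Pre_copy_case reference_word word_to_change → Spec_copy_case reference_word word_to_change (copy_case reference_word word_to_change)

-- ===== LEMMAS AND PROOFS =====

-- pieces of a split on ' ' contain no ' '
theorem splitOn_go_no_sep (fuel : Nat) (l cur : List Char) (acc : List (List Char))
    (hf : l.length ≤ fuel) (hcur : ' ' ∉ cur) (hacc : ∀ p ∈ acc, ' ' ∉ p) :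
    ∀ p ∈ PySem.Chars.splitOn.go [' '] fuel l cur acc, ' ' ∉ p := by
  induction fuel generalizing l cur acc with
  | zero =>
    interval_cases h : l.length
    · rw [List.length_eq_zero_iff] at h; subst h
      rw [PySem.Chars.splitOn.go.eq_def]
      simp only [List.mem_reverse, List.mem_cons]
      rintro p (rfl | hp)
      · simpa using hcur
      · exact hacc p hp
  | succ fuel ih =>
    match l with
    | [] =>
      rw [PySem.Chars.splitOn.go.eq_def]
      simp only [List.mem_reverse, List.mem_cons]
      rintro p (rfl | hp)
      · simpa using hcur
      · exact hacc p hp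
    | c :: rest =>
      rw [PySem.Chars.splitOn.go.eq_def]
      simp only []
      by_cases hpre : [' '].isPrefixOf (c :: rest) = true
      · rw [if_pos hpre]
        apply ih
        · simpa using Nat.le_of_succ_le_succ (by simpa using hf)
        · simp
        · intro p hp
          rcases List.mem_cons.mp hp with rfl | hp'
          · simpa using hcur
          · exact hacc p hp'
      · rw [if_neg hpre]
        apply ih
        · simpa using Nat.le_of_succ_le_succ (by simpa using hf)
        · intro hmem
          rcases List.mem_cons.mp hmem with rfl | h'
          · apply hpre; simp [List.isPrefixOf]
          · exact hcur h'
        · exact hacc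

theorem splitOn_pieces_no_sep (s : List Char) :
    ∀ p ∈ PySem.Chars.splitOn s [' '], ' ' ∉ p := by
  unfold PySem.Chars.splitOn
  exact splitOn_go_no_sep _ _ _ _ (by omega) (by simp) (by simp)

-- a space-free string splits to itself
theorem splitOn_go_no_sep_id (fuel : Nat) (l cur : List Char) (acc : List (List Char))
    (hl : ' ' ∉ l) :
    PySem.Chars.splitOn.go [' '] fuel l cur acc = ((cur.reverse ++ l) :: acc).reverse := by
  induction fuel generalizing l cur with
  | zero => rw [PySem.Chars.splitOn.go.eq_def]
  | succ fuel ih =>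
    match l with
    | [] => rw [PySem.Chars.splitOn.go.eq_def]; simp
    | c :: rest =>
      rw [PySem.Chars.splitOn.go.eq_def]
      simp only []
      have hc : c ≠ ' ' := fun h => hl (h ▸ List.mem_cons_self)
      have hpre : [' '].isPrefixOf (c :: rest) = false := by
        simp [List.isPrefixOf]; exact fun h => hc h.symm
      rw [if_neg (by simp [hpre])]
      rw [ih rest (c :: cur) (fun h => hl (List.mem_cons_of_mem _ h))]
      simp

theorem splitOn_of_no_sep (s : List Char) (h : ' ' ∉ s) :
    PySem.Chars.splitOn s [' '] = [s] := by
  unfold PySem.Chars.splitOn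
  rw [splitOn_go_no_sep_id _ _ _ _ h]
  simp

-- join facts
theorem join_flat (q : List Char) (qs : List (List Char)) :
    PySem.Chars.join [' '] (q :: qs) = q ++ qs.flatMap (fun x => ' ' :: x) := by
  induction qs generalizing q with
  | nil => simp [PySem.Chars.join_singleton]
  | cons y ys ih => rw [PySem.Chars.join_cons_cons, ih y]; simp

theorem join_append_single (X : List (List Char)) (q : List Char) :
    PySem.Chars.join [' '] (X ++ [q])
      = PySem.Chars.join [' '] X ++ (if X = [] then [] else [' ']) ++ q := by
  match X with
  | [] => simp [PySem.Chars.join_nil, PySem.Chars.join_singleton]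
  | x :: X' =>
    rw [List.cons_append, join_flat, join_flat]
    simp [List.flatMap_append]

-- splitOn/join round trip
theorem go_join (fuel : Nat) (l cur : List Char) (acc : List (List Char))
    (hf : l.length ≤ fuel) :
    PySem.Chars.join [' '] (PySem.Chars.splitOn.go [' '] fuel l cur acc)
      = PySem.Chars.join [' '] ((cur.reverse :: acc).reverse) ++ l := by
  induction fuel generalizing l cur acc with
  | zero =>
    interval_cases h : l.length
    · rw [List.length_eq_zero_iff] at h; subst h
      rw [PySem.Chars.splitOn.go.eq_def]; simp
  | succ fuel ih =>
    match l with
    | [] => rw [PySem.Chars.splitOn.go.eq_def]; simp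
    | c :: rest =>
      rw [PySem.Chars.splitOn.go.eq_def]
      simp only []
      by_cases hpre : [' '].isPrefixOf (c :: rest) = true
      · have hc' : ' ' = c := by simpa [List.isPrefixOf] using hpre
        have hc : c = ' ' := hc'.symm
        rw [if_pos hpre]
        have hdrop : List.drop [' '].length (c :: rest) = rest := by simp
        rw [hdrop, ih rest [] (cur.reverse :: acc) (by simpa using Nat.le_of_succ_le_succ (by simpa using hf))]
        have h1 : (([] : List Char).reverse :: cur.reverse :: acc).reverse
            = ((cur.reverse :: acc).reverse) ++ [[]] := by simp
        rw [h1, join_append_single]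
        rw [if_neg (by simp)]
        simp [hc]
      · rw [if_neg hpre]
        rw [ih rest (c :: cur) acc (by simpa using Nat.le_of_succ_le_succ (by simpa using hf))]
        have h1 : ((c :: cur).reverse :: acc).reverse = acc.reverse ++ [cur.reverse ++ [c]] := by simp
        have h2 : (cur.reverse :: acc).reverse = acc.reverse ++ [cur.reverse] := by simp
        rw [h1, h2, join_append_single, join_append_single]
        simp

theorem splitOn_join (s : List Char) :
    PySem.Chars.join [' '] (PySem.Chars.splitOn s [' ']) = s := by
  unfold PySem.Chars.splitOn
  rw [go_join _ _ _ _ (by omega)]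
  simp [PySem.Chars.join_singleton]

-- non-alpha characters are fixed by upper/lower
theorem nonalpha_fix (c : Char) (h : PySem.Chars.isalpha c = false) :
    PySem.Chars.upperChar c = c ∧ PySem.Chars.lowerChar c = c := by
  simp [PySem.Chars.isalpha] at h
  constructor
  · simp [PySem.Chars.upperChar, h.2]
  · simp [PySem.Chars.lowerChar, h.1]

-- applyMask basics
theorem applyMask_nil (m : List Bool) : applyMask [] m = [] := by simp [applyMask]

theorem applyMask_cons (c : Char) (w : List Char) (b : Bool) (m : List Bool) :
    applyMask (c :: w) (b :: m)
      = (if b then PySem.Chars.upperChar c else PySem.Chars.lowerChar c) :: applyMask w m := by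
  simp [applyMask]

theorem applyMask_append (a b : List Char) (ma mb : List Bool) (h : a.length = ma.length) :
    applyMask (a ++ b) (ma ++ mb) = applyMask a ma ++ applyMask b mb := by
  unfold applyMask
  rw [List.zip_append h]
  simp

theorem applyMask_replicate_false (w : List Char) :
    applyMask w (List.replicate w.length false) = PySem.Chars.lower w := by
  induction w with
  | nil => simp [applyMask, PySem.Chars.lower]
  | cons c cs ih =>
    rw [List.length_cons, List.replicate_succ, applyMask_cons, ih]
    simp [PySem.Chars.lower]

theorem applyMask_replicate_true (w : List Char) :
    applyMask w (List.replicate w.length true) = PySem.Chars.upper w := by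
  induction w with
  | nil => simp [applyMask, PySem.Chars.upper]
  | cons c cs ih =>
    rw [List.length_cons, List.replicate_succ, applyMask_cons, ih]
    simp [PySem.Chars.upper]

-- title case: both the A-side fold (strTitle) and the B-side mask fold unroll to structural recursions
def tTitle (b : Bool) : List Char → List Char
  | [] => []
  | c :: cs =>
    (if PySem.Chars.isalpha c then
       (if b then PySem.Chars.lowerChar c else PySem.Chars.upperChar c) else c)
      :: tTitle (PySem.Chars.isalpha c) cs

def tMask (b : Bool) : List Char → List Bool
  | [] => []
  | c :: cs => (!b) :: tMask (PySem.Chars.isalpha c) cs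

theorem strTitle_fold (w : List Char) (acc : List Char) (b : Bool) :
    (w.foldl (fun (st : List Char × Bool) c =>
      if PySem.Chars.isalpha c then
        (st.1 ++ [if st.2 then PySem.Chars.lowerChar c else PySem.Chars.upperChar c], true)
      else (st.1 ++ [c], false)) (acc, b)).1 = acc ++ tTitle b w := by
  induction w generalizing acc b with
  | nil => simp [tTitle]
  | cons c cs ih =>
    rw [List.foldl_cons]
    by_cases h : PySem.Chars.isalpha c = true
    · rw [if_pos h]; rw [ih]; simp [tTitle, h]
    · rw [if_neg h]; rw [ih]
      simp only [Bool.not_eq_true] at h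
      simp [tTitle, h]

theorem mask_fold (w : List Char) (acc : List Bool) (b : Bool) :
    (w.foldl (fun (st : List Bool × Bool) c =>
      (st.1 ++ [!st.2], PySem.Chars.isalpha c)) (acc, b)).1 = acc ++ tMask b w := by
  induction w generalizing acc b with
  | nil => simp [tMask]
  | cons c cs ih => rw [List.foldl_cons, ih]; simp [tMask]

theorem tMask_length (b : Bool) (w : List Char) : (tMask b w).length = w.length := by
  induction w generalizing b with
  | nil => rfl
  | cons c cs ih => simp [tMask, ih]

theorem apply_tMask (w : List Char) (b : Bool) :
    applyMask w (tMask b w) = tTitle b w := by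
  induction w generalizing b with
  | nil => rfl
  | cons c cs ih =>
    rw [show tMask b (c :: cs) = (!b) :: tMask (PySem.Chars.isalpha c) cs from rfl,
        applyMask_cons, ih]
    congr 1
    by_cases h : PySem.Chars.isalpha c = true
    · cases b <;> simp [h]
    · simp only [Bool.not_eq_true] at h
      rcases nonalpha_fix c h with ⟨h1, h2⟩
      cases b <;> simp [h, h1, h2]

-- the per-character pattern both character loops compute
def patSpec (ref : List Char) : Nat → List Char → List Char
  | _, [] => []
  | j, c :: cs =>
    (match ref[j % ref.length]? with
      | some rc => if PySem.Chars.isupper rc then PySem.Chars.upperChar c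
                   else PySem.Chars.lowerChar c
      | none => c) :: patSpec ref (j+1) cs

def mSpec (ref : List Char) : Nat → List Char → List Bool
  | _, [] => []
  | j, _ :: cs =>
    (match ref[j % ref.length]? with
      | some rc => PySem.Chars.isupper rc
      | none => false) :: mSpec ref (j+1) cs

theorem charLoopA_eq_patSpec (ref : List Char) (w : List Char)
    (i0 : Nat) (acc : List Char) :
    (PySem.List.enumerate w (i0 : Int)).foldl (fun acc p =>
      acc ++ [match PySem.List.pyGet? ref (PySem.Int.mod p.1 (ref.length : Int)) with
              | some rc => copy_case_letter rc p.2
              | none => p.2]) acc = acc ++ patSpec ref i0 w := by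
  induction w generalizing i0 acc with
  | nil => simp [PySem.List.enumerate, patSpec]
  | cons c cs ih =>
    have he : PySem.List.enumerate (c :: cs) (i0 : Int)
        = ((i0 : Int), c) :: PySem.List.enumerate cs ((i0 : Int)+1) := by
      simp [PySem.List.enumerate]
    rw [he, List.foldl_cons]
    have h1 : ((i0 : Int) + 1) = (((i0 + 1 : Nat)) : Int) := by push_cast; ring
    rw [h1, ih]
    simp only [patSpec, PySem.Int.mod_natCast, PySem.List.pyGet?_natCast, copy_case_letter]
    simp

theorem apply_mSpec (ref w : List Char) (j : Nat) (href : ref ≠ []) :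
    applyMask w (mSpec ref j w) = patSpec ref j w := by
  induction w generalizing j with
  | nil => rfl
  | cons c cs ih =>
    have hn : 0 < ref.length := List.length_pos_iff.mpr href
    have hlt : j % ref.length < ref.length := Nat.mod_lt _ hn
    rw [show mSpec ref j (c :: cs)
        = (match ref[j % ref.length]? with
           | some rc => PySem.Chars.isupper rc
           | none => false) :: mSpec ref (j+1) cs from rfl,
        applyMask_cons, ih]
    rw [show patSpec ref j (c :: cs)
        = (match ref[j % ref.length]? with
           | some rc => if PySem.Chars.isupper rc then PySem.Chars.upperChar c
                        else PySem.Chars.lowerChar c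
           | none => c) :: patSpec ref (j+1) cs from rfl]
    rw [List.getElem?_eq_getElem hlt]

theorem range_map_mSpec (ref w : List Char) (j : Nat) :
    (List.range w.length).map (fun i =>
      (match ref[(i + j) % ref.length]? with
        | some rc => PySem.Chars.isupper rc
        | none => false)) = mSpec ref j w := by
  induction w generalizing j with
  | nil => rfl
  | cons c cs ih =>
    rw [List.length_cons, List.range_succ_eq_map, List.map_cons, List.map_map]
    rw [show mSpec ref j (c :: cs)
        = (match ref[j % ref.length]? with
           | some rc => PySem.Chars.isupper rc
           | none => false) :: mSpec ref (j+1) cs from rfl]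
    congr 1
    · simp
    · rw [← ih (j+1)]
      apply List.map_congr_left
      intro i _
      simp [Function.comp, Nat.add_assoc, Nat.add_comm 1 j]

theorem patternMask_eq_mSpec (ref w : List Char) :
    patternMask ref w = mSpec ref 0 w := by
  rw [← range_map_mSpec ref w 0]
  unfold patternMask
  apply List.map_congr_left
  intro i _
  rw [PySem.Int.mod_natCast, PySem.List.pyGet?_natCast]
  simp

theorem mSpec_length (ref w : List Char) (j : Nat) : (mSpec ref j w).length = w.length := by
  induction w generalizing j with
  | nil => rfl
  | cons c cs ih => simp [mSpec, ih]

-- the pattern branch: B's mask application equals A's character loop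
theorem pattern_agree (ref w : List Char) (h : ref = [] → w = []) :
    applyMask w (patternMask ref w) = charLoopA ref w := by
  match w with
  | [] => simp [applyMask_nil, charLoopA, PySem.List.enumerate]
  | c :: cs =>
    have href : ref ≠ [] := fun hr => by simpa using h hr
    unfold charLoopA
    have hA := charLoopA_eq_patSpec ref (c :: cs) 0 []
    rw [show (((0:Nat)):Int) = (0:Int) from rfl] at hA
    rw [hA, patternMask_eq_mSpec, apply_mSpec ref (c :: cs) 0 href]
    simp

-- mask lengths
theorem wordMask_length (p q : List Char) : (wordMask p q).length = q.length := by
  unfold wordMask caseMask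
  split_ifs with h1 h2 h3
  · simp
  · simp
  · simp [mask_fold q [] false, tMask_length]
  · rw [patternMask_eq_mSpec, mSpec_length]

-- word level: B's mask application equals A's one-word computation
theorem word_agree (fuel : Nat) (p q : List Char) (hp : ' ' ∉ p) (hq : ' ' ∉ q)
    (hpre : p = [] → q = []) :
    applyMask q (wordMask p q) = copy_case_core (fuel+1) p q := by
  unfold wordMask caseMask
  simp only [copy_case_core]
  by_cases h1 : strIslower p = true
  · rw [if_pos h1, if_pos h1]; exact applyMask_replicate_false q
  · rw [if_neg h1, if_neg h1]
    by_cases h2 : strIsupper p = true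
    · rw [if_pos h2, if_pos h2]; exact applyMask_replicate_true q
    · rw [if_neg h2, if_neg h2]
      by_cases h3 : strIstitle p = true
      · rw [if_pos h3, if_pos h3]
        rw [mask_fold q [] false]
        simp only [List.nil_append]
        rw [apply_tMask q false]
        rw [show strTitle q = (q.foldl (fun (st : List Char × Bool) c =>
          if PySem.Chars.isalpha c then
            (st.1 ++ [if st.2 then PySem.Chars.lowerChar c else PySem.Chars.upperChar c], true)
          else (st.1 ++ [c], false)) (([] : List Char), false)).1 from rfl,
          strTitle_fold q [] false]
        simp
      · rw [if_neg h3, if_neg h3]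
        rw [splitOn_of_no_sep p hp, splitOn_of_no_sep q hq]
        rw [if_neg (by simp)]
        exact pattern_agree p q hpre

-- the equal-length split branch, tail part, as flatMaps
theorem parts_tail_agree (fuel : Nat) (ps : List (List Char × List Char))
    (hps : ∀ pr ∈ ps, ' ' ∉ pr.1 ∧ ' ' ∉ pr.2 ∧ (pr.1 = [] → pr.2 = [])) :
    applyMask (ps.flatMap (fun pr => ' ' :: pr.2))
        (ps.flatMap (fun pr => false :: wordMask pr.1 pr.2))
      = ps.flatMap (fun pr => ' ' :: copy_case_core (fuel+1) pr.1 pr.2) := by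
  induction ps with
  | nil => rfl
  | cons pr rest ih =>
    rcases hps pr List.mem_cons_self with ⟨h1, h2, h3⟩
    rw [List.flatMap_cons, List.flatMap_cons, List.flatMap_cons]
    rw [show ((' ' : Char) :: pr.2) = [' '] ++ pr.2 from rfl,
        show (false :: wordMask pr.1 pr.2) = [false] ++ wordMask pr.1 pr.2 from rfl]
    rw [List.append_assoc, List.append_assoc]
    rw [applyMask_append [' '] _ [false] _ (by simp)]
    rw [applyMask_append pr.2 _ (wordMask pr.1 pr.2) _ (wordMask_length pr.1 pr.2).symm]
    rw [word_agree fuel pr.1 pr.2 h1 h2 h3]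
    rw [ih (fun x hx => hps x (List.mem_cons_of_mem _ hx))]
    simp [applyMask_cons]
    exact ⟨by decide, rfl⟩

theorem splitOn_go_ne_nil (fuel : Nat) (l cur : List Char) (acc : List (List Char)) :
    PySem.Chars.splitOn.go [' '] fuel l cur acc ≠ [] := by
  induction fuel generalizing l cur acc with
  | zero => rw [PySem.Chars.splitOn.go.eq_def]; simp
  | succ fuel ih =>
    match l with
    | [] => rw [PySem.Chars.splitOn.go.eq_def]; simp
    | c :: rest =>
      rw [PySem.Chars.splitOn.go.eq_def]
      simp only []
      split_ifs with h
      · exact ih _ _ _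
      · exact ih _ _ _

theorem splitOn_ne_nil (s : List Char) : PySem.Chars.splitOn s [' '] ≠ [] := by
  unfold PySem.Chars.splitOn
  exact splitOn_go_ne_nil _ _ _ _

-- A's range-indexed map over the split equals the zip map
theorem range_map_eq_zip_map (fuel : Nat) (sr sw : List (List Char)) (h : sr.length = sw.length) :
    (List.range sr.length).map (fun i => copy_case_core fuel (sr.getD i []) (sw.getD i []))
      = (sr.zip sw).map (fun pr => copy_case_core fuel pr.1 pr.2) := by
  apply List.ext_getElem
  · simp [← h]
  · intro i hi1 hi2
    simp only [List.getElem_map, List.getElem_range, List.getElem_zip]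
    have hr : i < sr.length := by simpa using hi1
    have hw : i < sw.length := by rw [← h]; exact hr
    rw [List.getD_eq_getElem _ _ hr, List.getD_eq_getElem _ _ hw]

-- ===== VERDICT (by name: the statement is the Claim_ definition above) =====
theorem copy_case_spec : Claim_equal_copy_case := by
  intro r w hdom hpre
  unfold Spec_copy_case copy_case copy_case_alt
  simp only [copy_case_core]
  unfold caseMask
  by_cases h1 : strIslower r.toList = true
  · rw [if_pos h1, if_pos h1]
    rw [applyMask_replicate_false]
  · rw [if_neg h1, if_neg h1]
    by_cases h2 : strIsupper r.toList = true
    · rw [if_pos h2, if_pos h2]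
      rw [applyMask_replicate_true]
    · rw [if_neg h2, if_neg h2]
      by_cases h3 : strIstitle r.toList = true
      · rw [if_pos h3, if_pos h3]
        rw [mask_fold w.toList [] false]
        simp only [List.nil_append]
        rw [apply_tMask w.toList false]
        rw [show strTitle w.toList = (w.toList.foldl (fun (st : List Char × Bool) c =>
          if PySem.Chars.isalpha c then
            (st.1 ++ [if st.2 then PySem.Chars.lowerChar c else PySem.Chars.upperChar c], true)
          else (st.1 ++ [c], false)) (([] : List Char), false)).1 from rfl,
          strTitle_fold w.toList [] false]
        simp
      · rw [if_neg h3, if_neg h3]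
        have hpre4 :
            (let sr := PySem.Chars.splitOn r.toList [' ']
             let sw := PySem.Chars.splitOn w.toList [' ']
             if sr.length = sw.length ∧ sw.length ≠ 1
             then ∀ p ∈ sr.zip sw, p.1 = [] → p.2 = []
             else (r.toList = [] → w.toList = [])) := by
          rcases hpre with h | h | h | h
          · exact absurd h h1
          · exact absurd h h2
          · exact absurd h h3
          · exact h
        simp only [] at hpre4 ⊢
        by_cases hcond : (PySem.Chars.splitOn r.toList [' ']).length
            = (PySem.Chars.splitOn w.toList [' ']).length ∧
            (PySem.Chars.splitOn w.toList [' ']).length ≠ 1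
        · rw [if_pos hcond, if_pos hcond]
          rw [if_pos hcond] at hpre4
          congr 1
          have hlen : (PySem.Chars.splitOn r.toList [' ']).length
              = (PySem.Chars.splitOn w.toList [' ']).length := hcond.1
          rw [range_map_eq_zip_map _ _ _ hlen]
          have href : r.toList ≠ [] := by
            intro hr
            have h5 : PySem.Chars.splitOn r.toList [' '] = [[]] := by rw [hr]; decide
            rw [h5] at hcond
            simp at hcond
            omega
          have hfuel : r.toList.length = (r.toList.length - 1) + 1 := by
            have : 0 < r.toList.length := List.length_pos_iff.mpr href
            omega
          rw [hfuel]
          obtain ⟨r0, sr', hsr⟩ := List.exists_cons_of_ne_nil (splitOn_ne_nil r.toList)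
          obtain ⟨w0, sw', hsw⟩ := List.exists_cons_of_ne_nil (splitOn_ne_nil w.toList)
          have hprops : ∀ pr ∈ (r0 :: sr').zip (w0 :: sw'),
              ' ' ∉ pr.1 ∧ ' ' ∉ pr.2 ∧ (pr.1 = [] → pr.2 = []) := by
            intro pr hpr
            rw [← hsr, ← hsw] at hpr
            have hmr : pr.1 ∈ PySem.Chars.splitOn r.toList [' '] := (List.of_mem_zip hpr).1
            have hmw : pr.2 ∈ PySem.Chars.splitOn w.toList [' '] := (List.of_mem_zip hpr).2
            exact ⟨splitOn_pieces_no_sep r.toList pr.1 hmr,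
                   splitOn_pieces_no_sep w.toList pr.2 hmw, hpre4 pr hpr⟩
          have hw : w.toList = PySem.Chars.join [' '] (w0 :: sw') := by
            conv_lhs => rw [← splitOn_join w.toList, hsw]
          have hlen' : sr'.length = sw'.length := by
            rw [hsr, hsw] at hlen; simpa using hlen
          have hsnd : (sr'.zip sw').map Prod.snd = sw' :=
            List.map_snd_zip (le_of_eq hlen'.symm)
          rw [hsr, hsw, hw]
          rw [List.zip_cons_cons, List.map_cons, List.map_cons]
          simp only [List.tail_cons, List.headD_cons]
          simp only [List.append_assoc]
          rw [PySem.List.foldl_append_eq_flatMap]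
          rw [join_flat w0 sw', join_flat]
          simp only [List.flatMap_map]
          have hflat : sw'.flatMap (fun x => ' ' :: x)
              = (sr'.zip sw').flatMap (fun pr => ' ' :: pr.2) := by
            conv_lhs => rw [← hsnd]
            rw [List.flatMap_map]
          rw [hflat]
          rw [applyMask_append w0 _ _ _ (wordMask_length r0 w0).symm]
          rw [word_agree (r.toList.length - 1) r0 w0
                (hprops _ List.mem_cons_self).1 (hprops _ List.mem_cons_self).2.1
                (hprops _ List.mem_cons_self).2.2]
          congr 1
          have htail := parts_tail_agree (r.toList.length - 1) (sr'.zip sw')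
            (fun x hx => hprops x (List.mem_cons_of_mem _ hx))
          simpa using htail.symm
        · rw [if_neg hcond, if_neg hcond]
          rw [if_neg hcond] at hpre4
          rw [pattern_agree r.toList w.toList hpre4]
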